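-- pv_equiv track=rewrite | github.com/alexrudloff/noodle | modules/scripting/module.py | parse_set_args
-- ===== SOURCE A (Python) =====
-- def token_spans(text):
--     spans = []
--     start = None
--     for index, ch in enumerate(text):
--         if ch.isspace():
--             if start is not None:
--                 spans.append((start, text[start:index]))
--                 start = None
--         elif start is None:
--             start = index
--     if start is not None:
--         spans.append((start, text[start:]))
--     return spans
--
-- def parse_ttl_seconds(raw):
--     value = raw.strip()
--     if not value:
--         raise ValueError("TTL duration cannot be empty.")
--     suffix = value[-1]
--     if suffix in {"s", "m", "h", "d"}:
--         number = value[:-1]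
--         multiplier = {"s": 1, "m": 60, "h": 60 * 60, "d": 60 * 60 * 24}[suffix]
--     else:
--         number = value
--         multiplier = 1
--     try:
--         seconds = int(number)
--     except ValueError:
--         raise ValueError(f"Invalid TTL duration: {value}")
--     if seconds <= 0:
--         raise ValueError("TTL duration must be greater than zero.")
--     return seconds * multiplier
--
-- def strip_trailing_ttl(text):
--     spans = token_spans(text)
--     if spans:
--         _, last = spans[-1]
--         if last.startswith("--ttl="):
--             ttl_seconds = parse_ttl_seconds(last.split("=", 1)[1])
--             body = text[: spans[-1][0]].rstrip()
--             if not body: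
--                 raise ValueError("Usage: /kv set <key> <value> [--ttl <duration>]")
--             return body, ttl_seconds
--     if len(spans) >= 2 and spans[-2][1] == "--ttl":
--         ttl_seconds = parse_ttl_seconds(spans[-1][1])
--         body = text[: spans[-2][0]].rstrip()
--         if not body:
--             raise ValueError("Usage: /kv set <key> <value> [--ttl <duration>]")
--         return body, ttl_seconds
--     return text, None
--
-- def parse_set_args(rest):
--     value = rest.strip()
--     if not value:
--         raise ValueError("Usage: /kv set <key> <value> [--ttl <duration>]")
--     body, ttl_seconds = strip_trailing_ttl(value)
--     first_space = next((i for i, ch in enumerate(body) if ch.isspace()), None)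
--     if first_space is None:
--         raise ValueError("Usage: /kv set <key> <value> [--ttl <duration>]")
--     key = body[:first_space].strip()
--     body_value = body[first_space:].strip()
--     if not key or not body_value:
--         raise ValueError("Usage: /kv set <key> <value> [--ttl <duration>]")
--     return key, body_value, ttl_seconds
-- ===== SOURCE B (Python) =====
-- _USAGE = "Usage: /kv set <key> <value> [--ttl <duration>]"
-- _UNITS = {"s": 1, "m": 60, "h": 3600, "d": 86400}
--
-- def _ttl_seconds(raw):
--     value = raw.strip()
--     if not value:
--         raise ValueError("TTL duration cannot be empty.")
--     mult = _UNITS.get(value[-1], 1)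
--     number = value[:-1] if value[-1] in _UNITS else value
--     seconds = int(number)
--     if seconds <= 0:
--         raise ValueError("TTL duration must be greater than zero.")
--     return seconds * mult
--
-- def parse_set_args(rest):
--     value = rest.strip()
--     if not value:
--         raise ValueError(_USAGE)
--     parts = value.rsplit(None, 2)
--     body, ttl = value, None
--     if parts[-1].startswith("--ttl="):
--         ttl = _ttl_seconds(parts[-1][6:])
--         body = value[: len(value) - len(parts[-1])].rstrip()
--     elif len(parts) >= 2 and parts[-2] == "--ttl":
--         ttl = _ttl_seconds(parts[-1])
--         body = parts[0] if len(parts) == 3 else ""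
--     if ttl is not None and not body:
--         raise ValueError(_USAGE)
--     kv = body.split(None, 1)
--     if len(kv) < 2:
--         raise ValueError(_USAGE)
--     return kv[0], kv[1], ttl
-- ===== Notes on version B (the rewrite author's own statement) =====
-- stated objective: simpler
-- what changed: Replaced the index-tracking span tokenizer (token_spans + absolute-index slicing in strip_trailing_ttl) with direct rsplit(None,2)/split(None,1) decomposition inlined into parse_set_args, so no index arithmetic or span list is built.
import Mathlib
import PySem

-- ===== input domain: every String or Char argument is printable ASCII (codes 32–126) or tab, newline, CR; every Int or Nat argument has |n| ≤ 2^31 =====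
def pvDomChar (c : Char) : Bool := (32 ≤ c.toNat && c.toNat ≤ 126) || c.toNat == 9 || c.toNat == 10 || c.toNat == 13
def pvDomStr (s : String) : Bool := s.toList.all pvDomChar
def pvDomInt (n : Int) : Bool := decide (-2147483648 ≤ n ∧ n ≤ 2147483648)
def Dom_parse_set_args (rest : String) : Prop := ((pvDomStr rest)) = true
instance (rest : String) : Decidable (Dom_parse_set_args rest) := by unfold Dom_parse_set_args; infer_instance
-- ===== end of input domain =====

-- B replaces A's index-tracking span tokenizer with a direct rsplit/split decomposition (simpler); return value
-- equivalence is proved on Pre_, the inputs where A returns instead of raising ValueError.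

-- ===== PORT A =====
-- helpers are ports of the same-module helpers of A, working on List Char; `none` = the helper raises ValueError.

-- loop body of token_spans' `for index, ch in enumerate(text)` (state: (spans, start))
def pvTsStep (text : List Char) (acc : List (Int × List Char) × Option Int) (p : Int × Char) :
    List (Int × List Char) × Option Int :=
  if PySem.Chars.isspace p.2 then
    match acc.2 with
    | some s => (acc.1 ++ [(s, PySem.List.slice text (some s) (some p.1))], none)
    | none => (acc.1, none)
  else
    match acc.2 with
    | none => (acc.1, some p.1)
    | some _ => acc

def pvTokenSpans (text : List Char) : List (Int × List Char) :=
  let r := (PySem.List.enumerate text 0).foldl (pvTsStep text) ([], none)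
  match r.2 with
  | some s => r.1 ++ [(s, PySem.List.slice text (some s) none)]
  | none => r.1

def pvParseTtlA (raw : List Char) : Option Int :=
  let value := PySem.Chars.strip raw
  if value = [] then none  -- raise ValueError
  else
    let suffix := (PySem.List.pyGet? value (-1)).getD ' '  -- value[-1]; in range since value ≠ []
    let nm : List Char × Int :=
      if suffix ∈ (['s', 'm', 'h', 'd'] : List Char) then
        (PySem.List.slice value none (some (-1)),
         if suffix = 's' then 1 else if suffix = 'm' then 60 else if suffix = 'h' then 60 * 60
         else 60 * 60 * 24)
      else (value, 1)
    match PySem.Int.ofChars? nm.1 with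
    | none => none  -- raise ValueError
    | some seconds => if seconds ≤ 0 then none else some (seconds * nm.2)

def pvStripTtlA (text : List Char) : Option (List Char × Option Int) :=
  let spans := pvTokenSpans text
  let lastPair := (PySem.List.pyGet? spans (-1)).getD (0, [])  -- spans[-1]; guarded by `if spans:`
  if spans ≠ [] ∧ PySem.Chars.startswith lastPair.2 "--ttl=".toList then
    -- last.split("=", 1)[1]
    let arg := (PySem.List.pyGet? ((PySem.Chars.splitMax? lastPair.2 ['='] 1).getD []) 1).getD []
    match pvParseTtlA arg with
    | none => none
    | some ttl =>
      let body := PySem.Chars.rstrip (PySem.List.slice text none (some lastPair.1))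
      if body = [] then none else some (body, some ttl)
  else
    let pair2 := (PySem.List.pyGet? spans (-2)).getD (0, [])  -- spans[-2]; guarded by len(spans) >= 2
    if spans.length ≥ 2 ∧ pair2.2 = "--ttl".toList then
      match pvParseTtlA lastPair.2 with
      | none => none
      | some ttl =>
        let body := PySem.Chars.rstrip (PySem.List.slice text none (some pair2.1))
        if body = [] then none else some (body, some ttl)
    else some (text, none)

def pvCoreA (rest : List Char) : Option (List Char × List Char × Option Int) :=
  let value := PySem.Chars.strip rest
  if value = [] then none  -- raise ValueError
  else
    match pvStripTtlA value with
    | none => none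
    | some (body, ttl) =>
      -- first_space = next((i for i, ch in enumerate(body) if ch.isspace()), None)
      match ((PySem.List.enumerate body 0).find? (fun p => PySem.Chars.isspace p.2)).map Prod.fst with
      | none => none  -- raise ValueError
      | some i =>
        let key := PySem.Chars.strip (PySem.List.slice body none (some i))
        let bval := PySem.Chars.strip (PySem.List.slice body (some i) none)
        if key = [] ∨ bval = [] then none else some (key, bval, ttl)

def parse_set_args (rest : String) : String × String × Option Int :=
  match pvCoreA rest.toList with
  | some (k, v, t) => (String.ofList k, String.ofList v, t)
  | none => ("", "", none)  -- A raises ValueError here; excluded by Pre_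

-- ===== PORT B =====

-- _UNITS = {"s": 1, "m": 60, "h": 3600, "d": 86400}
def pvUnits : PySem.Dict Char Int := PySem.Dict.mk [('s', 1), ('m', 60), ('h', 3600), ('d', 86400)]

def pvTtlB (raw : List Char) : Option Int :=
  let value := PySem.Chars.strip raw
  if value = [] then none  -- raise ValueError
  else
    let last := (PySem.List.pyGet? value (-1)).getD ' '  -- value[-1]; in range since value ≠ []
    let mult := pvUnits.getD last 1
    let number := if pvUnits.contains last then PySem.List.slice value none (some (-1)) else value
    match PySem.Int.ofChars? number with
    | none => none  -- int() raises ValueError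
    | some seconds => if seconds ≤ 0 then none else some (seconds * mult)

-- hand port of str.rsplit(None, m) (PySem has no rsplit): exact via the identity
-- s.rsplit(None, m) == [p[::-1] for p in s[::-1].split(None, m)][::-1]
def pvRsplit0Max (s : List Char) (m : Int) : List (List Char) :=
  ((PySem.Chars.split₀Max s.reverse m).map List.reverse).reverse

def pvCoreB (rest : List Char) : Option (List Char × List Char × Option Int) :=
  let value := PySem.Chars.strip rest
  if value = [] then none  -- raise ValueError
  else
    let parts := pvRsplit0Max value 2
    let lastP := (PySem.List.pyGet? parts (-1)).getD []
    let bt : Option (List Char × Option Int) :=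
      if PySem.Chars.startswith lastP "--ttl=".toList then
        match pvTtlB (PySem.List.slice lastP (some 6) none) with
        | none => none
        | some t =>
          some (PySem.Chars.rstrip
                  (PySem.List.slice value none (some ((value.length : Int) - (lastP.length : Int)))),
                some t)
      else if parts.length ≥ 2 ∧ (PySem.List.pyGet? parts (-2)).getD [] = "--ttl".toList then
        match pvTtlB lastP with
        | none => none
        | some t =>
          some ((if parts.length = 3 then (PySem.List.pyGet? parts 0).getD [] else []), some t)
      else some (value, none)
    match bt with
    | none => none
    | some (body, ttl) =>
      if ttl.isSome ∧ body = [] then none  -- raise ValueError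
      else
        let kv := PySem.Chars.split₀Max body 1
        if kv.length < 2 then none  -- raise ValueError
        else some ((PySem.List.pyGet? kv 0).getD [], (PySem.List.pyGet? kv 1).getD [], ttl)

def parse_set_args_alt (rest : String) : String × String × Option Int :=
  match pvCoreB rest.toList with
  | some (k, v, t) => (String.ofList k, String.ofList v, t)
  | none => ("", "", none)  -- B raises ValueError here; excluded by Pre_

-- ===== PRECONDITION & SPEC =====
-- closed-form helpers describing the decomposition "last whitespace-separated token / rstripped prefix before it"
def pvLastTok (cs : List Char) : List Char :=
  (cs.reverse.takeWhile (fun c => !PySem.Chars.isspace c)).reverse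
def pvHead (cs : List Char) : List Char :=
  ((cs.reverse.dropWhile (fun c => !PySem.Chars.isspace c)).dropWhile PySem.Chars.isspace).reverse
-- the TTL string parses to a positive int (optionally suffixed s/m/h/d)
def pvOkTTL (s : List Char) : Bool :=
  let v := PySem.Chars.strip s
  v ≠ [] &&
    match PySem.Int.ofChars?
        (if v.getLastD ' ' ∈ (['s', 'm', 'h', 'd'] : List Char) then v.dropLast else v) with
    | some n => decide (0 < n)
    | none => false

-- Pre_ = exactly the inputs where A returns normally (elsewhere A raises ValueError)
def Pre_parse_set_args (rest : String) : Prop :=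
  let cs := PySem.Chars.strip rest.toList
  cs ≠ [] ∧
    (if PySem.Chars.startswith (pvLastTok cs) "--ttl=".toList then
      pvOkTTL ((pvLastTok cs).drop 6) = true ∧ pvHead cs ≠ [] ∧ (pvHead cs).any PySem.Chars.isspace = true
    else if pvHead cs ≠ [] ∧ pvLastTok (pvHead cs) = "--ttl".toList then
      pvOkTTL (pvLastTok cs) = true ∧ pvHead (pvHead cs) ≠ [] ∧
        (pvHead (pvHead cs)).any PySem.Chars.isspace = true
    else (cs.any PySem.Chars.isspace) = true)

instance (rest : String) : Decidable (Pre_parse_set_args rest) := by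
  unfold Pre_parse_set_args; infer_instance

def pvWitness_parse_set_args : String := "key value --ttl=5s"

def Spec_parse_set_args (rest : String) (out : String × String × Option Int) : Prop :=
  out = parse_set_args_alt rest
instance (rest : String) (out : String × String × Option Int) : Decidable (Spec_parse_set_args rest out) := by
  unfold Spec_parse_set_args; infer_instance

-- ===== CLAIM (what is proved, stated in full; the proofs are below) =====
def Claim_equal_parse_set_args : Prop :=
  ∀ (rest : String), Dom_parse_set_args rest → Pre_parse_set_args rest →
    Spec_parse_set_args rest (parse_set_args rest)

-- ===== LEMMAS AND PROOFS =====

-- ---- generic takeWhile/dropWhile facts ----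
theorem pv_tw_append_pos {α} {p : α → Bool} {a : List α} (b : List α) (h : a.all p) :
    (a ++ b).takeWhile p = a ++ b.takeWhile p := by
  rw [List.takeWhile_append, if_pos]
  rw [List.takeWhile_eq_self_iff.mpr (by simpa [List.all_eq_true] using h)]

theorem pv_tw_eq_self {α} {p : α → Bool} {a : List α} (h : a.all p) : a.takeWhile p = a :=
  List.takeWhile_eq_self_iff.mpr (by simpa [List.all_eq_true] using h)

theorem pv_dw_eq_nil {α} {p : α → Bool} {a : List α} (h : a.all p) : a.dropWhile p = [] :=
  List.dropWhile_eq_nil_iff.mpr (by simpa [List.all_eq_true] using h)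

theorem pv_tw_append_neg {α} {p : α → Bool} {a : List α} (b : List α) (h : a.all p = false) :
    (a ++ b).takeWhile p = a.takeWhile p := by
  rw [List.takeWhile_append, if_neg]
  intro hlen
  have hta : a.takeWhile p = a := (List.takeWhile_prefix p).eq_of_length hlen
  have ha : a.all p = true := by
    simp only [List.all_eq_true]
    exact List.takeWhile_eq_self_iff.mp hta
  simp [ha] at h

theorem pv_dw_append_pos {α} {p : α → Bool} {a : List α} (b : List α) (h : a.all p) :
    (a ++ b).dropWhile p = b.dropWhile p := by
  rw [List.dropWhile_append, if_pos]
  simp [pv_dw_eq_nil h]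

theorem pv_dw_append_neg {α} {p : α → Bool} {a : List α} (b : List α) (h : a.all p = false) :
    (a ++ b).dropWhile p = a.dropWhile p ++ b := by
  rw [List.dropWhile_append, if_neg]
  intro hemp
  have hnil : a.dropWhile p = [] := by simpa using hemp
  have ha : a.all p = true := by
    simp only [List.all_eq_true]
    exact List.dropWhile_eq_nil_iff.mp hnil
  simp [ha] at h

theorem pv_tw_snoc_stop {α} {p : α → Bool} {b : α} (a : List α) (h : p b = false) :
    (a ++ [b]).takeWhile p = a.takeWhile p := by
  cases hall : a.all p with
  | true => rw [pv_tw_append_pos _ hall, pv_tw_eq_self hall]; simp [List.takeWhile, h]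
  | false => exact pv_tw_append_neg _ hall

theorem pv_dw_snoc_stop {α} {p : α → Bool} {b : α} (a : List α) (h : p b = false) :
    (a ++ [b]).dropWhile p = a.dropWhile p ++ [b] := by
  cases hall : a.all p with
  | true => rw [pv_dw_append_pos _ hall, pv_dw_eq_nil hall]; simp [List.dropWhile, h]
  | false => exact pv_dw_append_neg _ hall

theorem pv_drop_length_takeWhile {α} (p : α → Bool) (l : List α) :
    l.drop (l.takeWhile p).length = l.dropWhile p := by
  induction l with
  | nil => simp
  | cons c t ih => by_cases h : p c <;> simp [List.takeWhile, List.dropWhile, h, ih]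

theorem pv_take_length_takeWhile {α} (p : α → Bool) (l : List α) :
    l.take (l.takeWhile p).length = l.takeWhile p := by
  induction l with
  | nil => simp
  | cons c t ih => by_cases h : p c <;> simp [List.takeWhile, h, ih]

-- ---- left-to-right specification of token_spans (absolute offsets) ----
def ssA (off : Nat) (l : List Char) : List (Int × List Char) :=
  match l with
  | [] => []
  | c :: t =>
    if PySem.Chars.isspace c then ssA (off + 1) t
    else ((off : Int), c :: t.takeWhile (fun c => !PySem.Chars.isspace c)) ::
      ssA (off + 1 + (t.takeWhile (fun c => !PySem.Chars.isspace c)).length)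
        (t.dropWhile (fun c => !PySem.Chars.isspace c))
termination_by l.length
decreasing_by
  · simp only [List.length_cons]; omega
  · simp only [List.length_cons]
    have := List.length_dropWhile_le (l := t) (p := fun c => !PySem.Chars.isspace c)
    omega

theorem ssA_nil (off : Nat) : ssA off [] = [] := by rw [ssA]

theorem ssA_cons_ws (off : Nat) {c : Char} (t : List Char) (h : PySem.Chars.isspace c = true) :
    ssA off (c :: t) = ssA (off + 1) t := by rw [ssA]; simp [h]

theorem ssA_cons_nw (off : Nat) {c : Char} (t : List Char) (h : PySem.Chars.isspace c = false) :
    ssA off (c :: t) = ((off : Int), c :: t.takeWhile (fun c => !PySem.Chars.isspace c)) ::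
      ssA (off + 1 + (t.takeWhile (fun c => !PySem.Chars.isspace c)).length)
        (t.dropWhile (fun c => !PySem.Chars.isspace c)) := by rw [ssA]; simp [h]

-- ---- pvLastTok / pvHead structure lemmas ----
theorem pv_lastTok_len_le (cs : List Char) : (pvLastTok cs).length ≤ cs.length := by
  have := (List.takeWhile_prefix (l := cs.reverse) (fun c => !PySem.Chars.isspace c)).length_le
  simpa [pvLastTok] using this

theorem pv_lastTok_cons_ws {x : Char} (rest : List Char) (hx : PySem.Chars.isspace x = true) :
    pvLastTok (x :: rest) = pvLastTok rest := by
  have : (x :: rest).reverse = rest.reverse ++ [x] := by simp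
  rw [pvLastTok, this, pv_tw_snoc_stop _ (by simp [hx]), pvLastTok]

theorem pv_head_cons_ws {x : Char} (rest : List Char) (hx : PySem.Chars.isspace x = true) :
    pvHead (x :: rest) = if pvHead rest = [] then [] else x :: pvHead rest := by
  have hrev : (x :: rest).reverse = rest.reverse ++ [x] := by simp
  rw [pvHead, hrev, pv_dw_snoc_stop _ (by simp [hx])]
  cases hall : (rest.reverse.dropWhile (fun c => !PySem.Chars.isspace c)).all PySem.Chars.isspace with
  | true =>
    rw [pv_dw_append_pos _ hall, if_pos]
    · simp [hx]
    · rw [pvHead, pv_dw_eq_nil hall]; rfl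
  | false =>
    rw [pv_dw_append_neg _ hall, if_neg]
    · simp [pvHead]
    · unfold pvHead
      intro hnil
      rw [List.reverse_eq_nil_iff] at hnil
      have htrue : (rest.reverse.dropWhile (fun c => !PySem.Chars.isspace c)).all
          PySem.Chars.isspace = true := by
        simp only [List.all_eq_true]
        exact List.dropWhile_eq_nil_iff.mp hnil
      rw [htrue] at hall; cases hall

theorem pv_head_suffix_rev (cs : List Char) :
    (cs.reverse.dropWhile (fun c => !PySem.Chars.isspace c)).dropWhile PySem.Chars.isspace
      <:+ cs.reverse :=
  (List.dropWhile_suffix _).trans (List.dropWhile_suffix _)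

theorem pv_head_prefix (cs : List Char) : pvHead cs <+: cs := by
  have := (List.reverse_prefix (l₁ := ((cs.reverse.dropWhile (fun c => !PySem.Chars.isspace c)).dropWhile
      PySem.Chars.isspace)) (l₂ := cs.reverse)).mpr (pv_head_suffix_rev cs)
  simpa [pvHead] using this

theorem pv_head_last_not_ws (cs : List Char) (h : pvHead cs ≠ []) :
    PySem.Chars.isspace ((pvHead cs).getLast h) = false := by
  have h' : ((cs.reverse.dropWhile (fun c => !PySem.Chars.isspace c)).dropWhile
      PySem.Chars.isspace) ≠ [] := by
    intro hnil; exact h (by simp [pvHead, hnil])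
  have := List.head_dropWhile_not PySem.Chars.isspace h'
  unfold pvHead
  rw [List.getLast_reverse (by simpa using h')]
  exact this

theorem pv_head_head_ws (cs : List Char) (hcs : cs ≠ [])
    (hh : PySem.Chars.isspace (cs.head hcs) = true) (h : pvHead cs ≠ []) :
    PySem.Chars.isspace ((pvHead cs).head h) = true := by
  have h' : ((cs.reverse.dropWhile (fun c => !PySem.Chars.isspace c)).dropWhile
      PySem.Chars.isspace) ≠ [] := by
    intro hnil; exact h (by simp [pvHead, hnil])
  have hsfx := pv_head_suffix_rev cs
  have hrevne : cs.reverse ≠ [] := by simpa using hcs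
  have hlasteq := List.IsSuffix.getLast hsfx h'
  unfold pvHead
  rw [List.head_reverse (by simpa using h')]
  rw [hlasteq, List.getLast_reverse hrevne]
  exact hh

theorem pv_split_cons_nw {x : Char} (rest : List Char) (hx : PySem.Chars.isspace x = false)
    (hall : rest.all (fun c => !PySem.Chars.isspace c) = false) :
    pvLastTok (x :: rest) = pvLastTok (rest.dropWhile (fun c => !PySem.Chars.isspace c)) ∧
    pvHead (x :: rest) = (x :: rest.takeWhile (fun c => !PySem.Chars.isspace c)) ++
      pvHead (rest.dropWhile (fun c => !PySem.Chars.isspace c)) := by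
  have hdwne : rest.dropWhile (fun c => !PySem.Chars.isspace c) ≠ [] := by
    intro hnil
    have : rest.all (fun c => !PySem.Chars.isspace c) = true := by
      simp only [List.all_eq_true]
      exact List.dropWhile_eq_nil_iff.mp hnil
    rw [this] at hall; cases hall
  have hdwhead : PySem.Chars.isspace ((rest.dropWhile (fun c => !PySem.Chars.isspace c)).head hdwne)
      = true := by
    have := List.head_dropWhile_not (fun c => !PySem.Chars.isspace c) hdwne
    simpa using this
  have hdwrall : (rest.dropWhile (fun c => !PySem.Chars.isspace c)).reverse.all
      (fun c => !PySem.Chars.isspace c) = false := by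
    rw [List.all_reverse]
    cases hdwall : (rest.dropWhile (fun c => !PySem.Chars.isspace c)).all
        (fun c => !PySem.Chars.isspace c) with
    | false => rfl
    | true =>
      exfalso
      have := List.all_eq_true.mp hdwall _ (List.head_mem hdwne)
      simp [hdwhead] at this
  have hsplit : rest = rest.takeWhile (fun c => !PySem.Chars.isspace c) ++
      rest.dropWhile (fun c => !PySem.Chars.isspace c) := List.takeWhile_append_dropWhile.symm
  have hrev : (x :: rest).reverse = (rest.dropWhile (fun c => !PySem.Chars.isspace c)).reverse ++
      ((rest.takeWhile (fun c => !PySem.Chars.isspace c)).reverse ++ [x]) := by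
    have h2 := congrArg List.reverse hsplit
    rw [List.reverse_append] at h2
    simp only [List.reverse_cons, h2, List.append_assoc]
  have hUne : ((rest.dropWhile (fun c => !PySem.Chars.isspace c)).reverse.dropWhile
      (fun c => !PySem.Chars.isspace c)) ≠ [] := by
    intro hnil
    have := List.dropWhile_eq_nil_iff.mp hnil
    have hmem : (rest.dropWhile (fun c => !PySem.Chars.isspace c)).head hdwne ∈
        (rest.dropWhile (fun c => !PySem.Chars.isspace c)).reverse := by
      rw [List.mem_reverse]; exact List.head_mem hdwne
    have := this _ hmem
    simp [hdwhead] at this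
  constructor
  · rw [pvLastTok, hrev, pv_tw_append_neg _ hdwrall, pvLastTok]
  · rw [pvHead, hrev, pv_dw_append_neg _ hdwrall]
    cases hU : ((rest.dropWhile (fun c => !PySem.Chars.isspace c)).reverse.dropWhile
        (fun c => !PySem.Chars.isspace c)).all PySem.Chars.isspace with
    | true =>
      rw [pv_dw_append_pos _ hU]
      have hZ : (((rest.takeWhile (fun c => !PySem.Chars.isspace c)).reverse ++ [x]).dropWhile
          PySem.Chars.isspace) = (rest.takeWhile (fun c => !PySem.Chars.isspace c)).reverse ++ [x] := by
        cases htwr : (rest.takeWhile (fun c => !PySem.Chars.isspace c)).reverse with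
        | nil => simp [hx]
        | cons c z =>
          have hc : c ∈ rest.takeWhile (fun c => !PySem.Chars.isspace c) := by
            rw [← List.mem_reverse, htwr]; exact List.mem_cons_self
          have hcp := List.mem_takeWhile_imp hc
          simp only [Bool.not_eq_true'] at hcp
          rw [List.cons_append, List.dropWhile_cons_of_neg (by simp [hcp])]
      rw [hZ, pvHead, pv_dw_eq_nil hU]
      simp
    | false =>
      rw [pv_dw_append_neg _ hU, pvHead]
      simp
-- the master decomposition: the span list ends with the last token, preceded by the spans of pvHead
theorem ssA_ml (n : Nat) : ∀ (cs : List Char), cs.length ≤ n → ∀ (off : Nat) (hne : cs ≠ [])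
    (_ : PySem.Chars.isspace (cs.getLast hne) = false),
    ssA off cs = ssA off (pvHead cs) ++
      [(((off + cs.length - (pvLastTok cs).length : Nat) : Int), pvLastTok cs)] := by
  induction n with
  | zero =>
    intro cs hlen off hne _
    exact absurd (List.eq_nil_of_length_eq_zero (Nat.le_zero.mp hlen)) hne
  | succ n ih =>
    intro cs hlen off hne hlast
    match cs, hne with
    | x :: rest, _ =>
      cases hx : PySem.Chars.isspace x with
      | true =>
        -- leading whitespace: shift by one
        have hrne : rest ≠ [] := by
          rintro rfl
          rw [List.getLast_singleton] at hlast
          rw [hx] at hlast; cases hlast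
        have hrlast : PySem.Chars.isspace (rest.getLast hrne) = false := by
          rw [← List.getLast_cons (a := x) hrne]; exact hlast
        have hlen' : rest.length ≤ n := by simpa using hlen
        have hle := pv_lastTok_len_le rest
        rw [ssA_cons_ws _ _ hx, ih rest hlen' (off + 1) hrne hrlast,
          pv_lastTok_cons_ws _ hx, pv_head_cons_ws _ hx]
        cases hp : pvHead rest with
        | nil =>
          rw [if_pos rfl, ssA_nil, ssA_nil]
          have : off + 1 + rest.length - (pvLastTok rest).length =
              off + (x :: rest).length - (pvLastTok rest).length := by
            simp only [List.length_cons]; omega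
          rw [this]
        | cons y ys =>
          rw [if_neg (by simp), ssA_cons_ws _ _ hx, ← hp]
          have : off + 1 + rest.length - (pvLastTok rest).length =
              off + (x :: rest).length - (pvLastTok rest).length := by
            simp only [List.length_cons]; omega
          rw [this]
      | false =>
        cases hall : rest.all (fun c => !PySem.Chars.isspace c) with
        | true =>
          -- single trailing token
          have htw := pv_tw_eq_self hall
          have hdw := pv_dw_eq_nil hall
          have hcsall : (x :: rest).reverse.all (fun c => !PySem.Chars.isspace c) = true := by
            rw [List.all_reverse]
            simp only [List.all_cons, hall, hx]
            simp
          have hlt : pvLastTok (x :: rest) = x :: rest := by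
            rw [pvLastTok, pv_tw_eq_self hcsall, List.reverse_reverse]
          have hhd : pvHead (x :: rest) = [] := by
            rw [pvHead, pv_dw_eq_nil hcsall]
            simp
          rw [ssA_cons_nw _ _ hx, htw, hdw, ssA_nil, hlt, hhd, ssA_nil]
          have h0 : off + (x :: rest).length - (x :: rest).length = off := by omega
          rw [h0]
          simp
        | false =>
          obtain ⟨h1, h2⟩ := pv_split_cons_nw rest hx hall
          have hdwne : rest.dropWhile (fun c => !PySem.Chars.isspace c) ≠ [] := by
            intro hnil
            have : rest.all (fun c => !PySem.Chars.isspace c) = true := by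
              simp only [List.all_eq_true]
              exact List.dropWhile_eq_nil_iff.mp hnil
            rw [this] at hall; cases hall
          have hrne : rest ≠ [] := by rintro rfl; simp at hdwne
          have hdwlast : PySem.Chars.isspace
              ((rest.dropWhile (fun c => !PySem.Chars.isspace c)).getLast hdwne) = false := by
            have hsfx := List.dropWhile_suffix (l := rest) (fun c => !PySem.Chars.isspace c)
            rw [List.IsSuffix.getLast hsfx hdwne]
            rw [← List.getLast_cons (a := x) hrne]
            exact hlast
          have hlen' : (rest.dropWhile (fun c => !PySem.Chars.isspace c)).length ≤ n := by
            have := List.length_dropWhile_le (fun c => !PySem.Chars.isspace c) rest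
            simp only [List.length_cons] at hlen
            omega
          have hIH := ih _ hlen' (off + 1 + (rest.takeWhile (fun c => !PySem.Chars.isspace c)).length)
            hdwne hdwlast
          rw [ssA_cons_nw _ _ hx, hIH, h1, h2]
          -- expand ssA on (x :: tw) ++ pvHead dw
          have hstar : ssA off ((x :: rest.takeWhile (fun c => !PySem.Chars.isspace c)) ++
              pvHead (rest.dropWhile (fun c => !PySem.Chars.isspace c))) =
              ((off : Int), x :: rest.takeWhile (fun c => !PySem.Chars.isspace c)) ::
              ssA (off + 1 + (rest.takeWhile (fun c => !PySem.Chars.isspace c)).length)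
                (pvHead (rest.dropWhile (fun c => !PySem.Chars.isspace c))) := by
            cases hP : pvHead (rest.dropWhile (fun c => !PySem.Chars.isspace c)) with
            | nil =>
              have htwall := List.all_takeWhile (p := fun c => !PySem.Chars.isspace c) (l := rest)
              rw [List.append_nil, ssA_cons_nw _ _ hx, pv_tw_eq_self htwall, pv_dw_eq_nil htwall,
                ssA_nil]
            | cons y ys =>
              have hPne : pvHead (rest.dropWhile (fun c => !PySem.Chars.isspace c)) ≠ [] := by
                rw [hP]; simp
              have hdwhead : PySem.Chars.isspace
                  ((rest.dropWhile (fun c => !PySem.Chars.isspace c)).head hdwne) = true := by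
                have := List.head_dropWhile_not (fun c => !PySem.Chars.isspace c) hdwne
                simpa using this
              have hyws : PySem.Chars.isspace y = true := by
                have h3 := pv_head_head_ws _ hdwne hdwhead hPne
                have h4 : (pvHead (rest.dropWhile (fun c => !PySem.Chars.isspace c))).head hPne
                    = y := by simp [hP]
                rw [h4] at h3
                exact h3
              have hTW : (rest.takeWhile (fun c => !PySem.Chars.isspace c) ++
                  y :: ys).takeWhile (fun c => !PySem.Chars.isspace c) =
                  rest.takeWhile (fun c => !PySem.Chars.isspace c) := by
                rw [pv_tw_append_pos _ (List.all_takeWhile),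
                  List.takeWhile_cons_of_neg (by simp [hyws]), List.append_nil]
              have hDW : (rest.takeWhile (fun c => !PySem.Chars.isspace c) ++
                  y :: ys).dropWhile (fun c => !PySem.Chars.isspace c) = y :: ys := by
                rw [pv_dw_append_pos _ (List.all_takeWhile),
                  List.dropWhile_cons_of_neg (by simp [hyws])]
              rw [List.cons_append, ssA_cons_nw _ _ hx, hTW, hDW]
          rw [hstar]
          rw [List.cons_append]
          congr 2
          have hxle := pv_lastTok_len_le (rest.dropWhile (fun c => !PySem.Chars.isspace c))
          have hlensplit : (rest.takeWhile (fun c => !PySem.Chars.isspace c)).length +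
              (rest.dropWhile (fun c => !PySem.Chars.isspace c)).length = rest.length := by
            have h5 := List.takeWhile_append_dropWhile (p := fun c => !PySem.Chars.isspace c)
              (l := rest)
            have h6 := congrArg List.length h5
            rw [List.length_append] at h6
            exact h6
          have : off + 1 + (rest.takeWhile (fun c => !PySem.Chars.isspace c)).length +
              (rest.dropWhile (fun c => !PySem.Chars.isspace c)).length -
              (pvLastTok (rest.dropWhile (fun c => !PySem.Chars.isspace c))).length =
              off + (x :: rest).length -
              (pvLastTok (rest.dropWhile (fun c => !PySem.Chars.isspace c))).length := by
            simp only [List.length_cons]; omega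
          rw [this]

-- ---- the enumerate/foldl loop of token_spans computes ssA ----
def pvRunA (text l : List Char) (off : Int) (spans : List (Int × List Char)) (start : Option Int) :
    List (Int × List Char) :=
  let r := (PySem.List.enumerate l off).foldl (pvTsStep text) (spans, start)
  match r.2 with
  | some s => r.1 ++ [(s, PySem.List.slice text (some s) none)]
  | none => r.1

theorem pv_tokenSpans_eq_run (text : List Char) :
    pvTokenSpans text = pvRunA text text 0 [] none := rfl

theorem pv_enumerate_cons {α : Type} (c : α) (t : List α) (k : Int) :
    PySem.List.enumerate (c :: t) k = (k, c) :: PySem.List.enumerate t (k + 1) := rfl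

theorem pv_enumerate_nil {α : Type} (k : Int) : PySem.List.enumerate ([] : List α) k = [] := rfl

theorem pv_runA_spec (text : List Char) : ∀ (l : List Char) (off : Nat), l = text.drop off →
    (∀ spans, pvRunA text l (off : Int) spans none = spans ++ ssA off l) ∧
    (∀ spans (s : Nat), s ≤ off →
      pvRunA text l (off : Int) spans (some (s : Int)) =
        spans ++ ((s : Int), PySem.List.slice text (some (s : Int))
            (some ((off + (l.takeWhile (fun c => !PySem.Chars.isspace c)).length : Nat) : Int))) ::
          ssA (off + (l.takeWhile (fun c => !PySem.Chars.isspace c)).length)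
            (l.dropWhile (fun c => !PySem.Chars.isspace c))) := by
  intro l
  induction l with
  | nil =>
    intro off hoff
    have hlen : text.length ≤ off := by
      by_contra hlt
      push Not at hlt
      have : (text.drop off).length = text.length - off := List.length_drop ..
      rw [← hoff] at this
      simp at this
      omega
    constructor
    · intro spans
      rw [pvRunA, pv_enumerate_nil]
      show spans = spans ++ ssA off []
      rw [ssA_nil, List.append_nil]
    · intro spans s hs
      have hslice : PySem.List.slice text (some (s : Int)) none =
          PySem.List.slice text (some (s : Int)) (some ((off : Nat) : Int)) := by
        rw [PySem.List.slice_from _ (by positivity), PySem.List.slice_natCast, Int.toNat_natCast]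
        rw [List.take_of_length_le (by rw [List.length_drop]; omega)]
      rw [pvRunA, pv_enumerate_nil]
      show spans ++ [((s : Int), PySem.List.slice text (some (s : Int)) none)] = _
      rw [hslice]
      simp [ssA_nil]
  | cons c t ih =>
    intro off hoff
    have hofflt : off < text.length := by
      by_contra hge
      push Not at hge
      rw [List.drop_eq_nil_of_le hge] at hoff
      cases hoff
    have htail : t = text.drop (off + 1) := by
      have h9 := congrArg List.tail hoff
      rw [List.tail_drop] at h9
      simpa using h9
    obtain ⟨ihn, ihs⟩ := ih (off + 1) htail
    constructor
    · intro spans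
      cases hc : PySem.Chars.isspace c with
      | true =>
        have hstep : pvTsStep text (spans, none) ((off : Int), c) = (spans, none) := by
          simp [pvTsStep, hc]
        rw [pvRunA, pv_enumerate_cons]
        simp only [List.foldl_cons, hstep]
        have := ihn spans
        rw [pvRunA] at this
        push_cast at this ⊢
        rw [this, ssA_cons_ws _ _ hc]
      | false =>
        have hstep : pvTsStep text (spans, none) ((off : Int), c) = (spans, some (off : Int)) := by
          simp [pvTsStep, hc]
        rw [pvRunA, pv_enumerate_cons]
        simp only [List.foldl_cons, hstep]
        have := ihs spans off (Nat.le_succ off)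
        rw [pvRunA] at this
        push_cast at this ⊢
        rw [this]
        rw [ssA_cons_nw _ _ hc]
        have hsl : PySem.List.slice text (some (off : Int))
            (some ((off : Int) + 1 + ((t.takeWhile (fun c => !PySem.Chars.isspace c)).length : Int)))
            = c :: t.takeWhile (fun c => !PySem.Chars.isspace c) := by
          have hcast : (off : Int) + 1 + ((t.takeWhile (fun c => !PySem.Chars.isspace c)).length : Int)
              = ((off + 1 + (t.takeWhile (fun c => !PySem.Chars.isspace c)).length : Nat) : Int) := by
            push_cast; ring
          rw [hcast, PySem.List.slice_natCast]
          have hdrop : text.drop off = c :: t := hoff.symm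
          rw [hdrop]
          have : off + 1 + (t.takeWhile (fun c => !PySem.Chars.isspace c)).length - off =
              (t.takeWhile (fun c => !PySem.Chars.isspace c)).length + 1 := by omega
          rw [this, List.take_succ_cons]
          rw [pv_take_length_takeWhile]
        rw [hsl]
    · intro spans s hs
      cases hc : PySem.Chars.isspace c with
      | true =>
        have hstep : pvTsStep text (spans, some (s : Int)) ((off : Int), c) =
            (spans ++ [((s : Int), PySem.List.slice text (some (s : Int)) (some (off : Int)))],
              none) := by
          simp [pvTsStep, hc]
        rw [pvRunA, pv_enumerate_cons]
        simp only [List.foldl_cons, hstep]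
        have := ihn (spans ++ [((s : Int), PySem.List.slice text (some (s : Int)) (some (off : Int)))])
        rw [pvRunA] at this
        push_cast at this ⊢
        rw [this]
        rw [List.takeWhile_cons_of_neg (by simp [hc]), List.dropWhile_cons_of_neg (by simp [hc])]
        simp only [List.length_nil, Nat.add_zero]
        rw [ssA_cons_ws _ _ hc]
        simp
      | false =>
        have hstep : pvTsStep text (spans, some (s : Int)) ((off : Int), c) =
            (spans, some (s : Int)) := by
          simp [pvTsStep, hc]
        rw [pvRunA, pv_enumerate_cons]
        simp only [List.foldl_cons, hstep]
        have := ihs spans s (by omega)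
        rw [pvRunA] at this
        push_cast at this ⊢
        rw [this]
        rw [List.takeWhile_cons_of_pos (by simp [hc]), List.dropWhile_cons_of_pos (by simp [hc])]
        simp only [List.length_cons]
        have h7 : off + 1 + (t.takeWhile (fun c => !PySem.Chars.isspace c)).length =
            off + ((t.takeWhile (fun c => !PySem.Chars.isspace c)).length + 1) := by omega
        rw [h7]
        have h8 : ((off : Int) + 1 + ((t.takeWhile (fun c => !PySem.Chars.isspace c)).length : Int))
            = (off : Int) + (((t.takeWhile (fun c => !PySem.Chars.isspace c)).length + 1 : Nat) : Int) := by
          push_cast; ring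
        rw [h8]

theorem pv_tokenSpans_eq_ssA (text : List Char) : pvTokenSpans text = ssA 0 text := by
  rw [pv_tokenSpans_eq_run]
  have := (pv_runA_spec text text 0 (by simp)).1 []
  simpa using this

-- ---- specification of split₀Max (Python str.split(None, m)) ----
theorem pv_dw_dw_lt (l : List Char) (h : l.dropWhile PySem.Chars.isspace ≠ []) :
    ((l.dropWhile PySem.Chars.isspace).dropWhile (fun c => !PySem.Chars.isspace c)).length <
      l.length := by
  have hhead := List.head_dropWhile_not PySem.Chars.isspace h
  have hlen1 := (List.dropWhile_suffix (l := l) PySem.Chars.isspace).length_le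
  cases hdw : l.dropWhile PySem.Chars.isspace with
  | nil => exact absurd hdw h
  | cons c t =>
    have hcf : PySem.Chars.isspace c = false := by
      have h2 := hhead
      simp only [hdw] at h2
      simpa using h2
    rw [List.dropWhile_cons_of_pos (p := fun c => !PySem.Chars.isspace c) (by simp [hcf])]
    have := List.length_dropWhile_le (fun c => !PySem.Chars.isspace c) t
    rw [hdw] at hlen1
    simp only [List.length_cons] at hlen1
    omega

def spB (m : Nat) (l : List Char) : List (List Char) :=
  if h : l.dropWhile PySem.Chars.isspace = [] then []
  else if m = 0 then [l.dropWhile PySem.Chars.isspace]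
  else (l.dropWhile PySem.Chars.isspace).takeWhile (fun c => !PySem.Chars.isspace c) ::
    spB (m - 1) ((l.dropWhile PySem.Chars.isspace).dropWhile (fun c => !PySem.Chars.isspace c))
termination_by l.length
decreasing_by
  exact pv_dw_dw_lt l h

theorem spB_of_nil {l : List Char} (m : Nat) (h : l.dropWhile PySem.Chars.isspace = []) :
    spB m l = [] := by rw [spB]; simp [h]

theorem spB_zero {l : List Char} (h : l.dropWhile PySem.Chars.isspace ≠ []) :
    spB 0 l = [l.dropWhile PySem.Chars.isspace] := by rw [spB]; simp [h]

theorem spB_succ {l : List Char} (m : Nat) (hm : m ≠ 0)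
    (h : l.dropWhile PySem.Chars.isspace ≠ []) :
    spB m l = (l.dropWhile PySem.Chars.isspace).takeWhile (fun c => !PySem.Chars.isspace c) ::
      spB (m - 1) ((l.dropWhile PySem.Chars.isspace).dropWhile (fun c => !PySem.Chars.isspace c)) := by
  rw [spB]; simp [h, hm]

theorem pv_split0Max_go_spec : ∀ (fuel : Nat) (m : Nat) (l : List Char)
    (acc : List (List Char)), l.length < fuel →
    PySem.Chars.split₀Max.go fuel m l acc = acc.reverse ++ spB m l := by
  intro fuel
  induction fuel with
  | zero => intro m l acc h; omega
  | succ fuel ih =>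
    intro m l acc h
    rw [PySem.Chars.split₀Max.go.eq_def]
    cases hdw : l.dropWhile PySem.Chars.isspace with
    | nil => rw [spB_of_nil m hdw]; simp only [hdw]; simp
    | cons c t =>
      simp only [hdw]
      by_cases hm : m = 0
      · subst hm
        rw [if_pos rfl]
        rw [spB_zero (by rw [hdw]; simp), hdw]
        simp
      · rw [if_neg hm]
        have hlt : ((c :: t).dropWhile (fun c => !PySem.Chars.isspace c)).length < fuel := by
          have := pv_dw_dw_lt l (by rw [hdw]; simp)
          rw [hdw] at this
          omega
        rw [ih (m - 1) _ _ hlt]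
        rw [spB_succ m hm (by rw [hdw]; simp), hdw]
        simp

theorem pv_split0Max_eq_spB (s : List Char) (m : Nat) :
    PySem.Chars.split₀Max s (m : Int) = spB m s := by
  rw [PySem.Chars.split₀Max, if_neg (by omega)]
  rw [Int.toNat_natCast]
  exact pv_split0Max_go_spec _ m s [] (by omega)

-- ---- str.split("=", 1) on a token that starts with "--ttl=" ----
theorem pv_som_go_zero (sep : List Char) : ∀ (fuel : Nat) (l cur : List Char)
    (acc : List (List Char)),
    PySem.Chars.splitOnMax.go sep fuel 0 l cur acc = ((cur.reverse ++ l) :: acc).reverse := by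
  intro fuel l cur acc
  cases fuel with
  | zero => rw [PySem.Chars.splitOnMax.go.eq_def]
  | succ f =>
    cases l with
    | nil => rw [PySem.Chars.splitOnMax.go.eq_def]; simp
    | cons c rest => rw [PySem.Chars.splitOnMax.go.eq_def]; simp

theorem pv_som_go_step (sep : List Char) (fuel m : Nat) (c : Char) (rest cur : List Char)
    (acc : List (List Char)) (hm : m ≠ 0) (hpre : sep.isPrefixOf (c :: rest) = false) :
    PySem.Chars.splitOnMax.go sep (fuel + 1) m (c :: rest) cur acc =
      PySem.Chars.splitOnMax.go sep fuel m rest (c :: cur) acc := by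
  conv_lhs => rw [PySem.Chars.splitOnMax.go.eq_def]
  simp [hm, hpre]

theorem pv_som_go_hit (sep : List Char) (fuel m : Nat) (c : Char) (rest cur : List Char)
    (acc : List (List Char)) (hm : m ≠ 0) (hpre : sep.isPrefixOf (c :: rest) = true) :
    PySem.Chars.splitOnMax.go sep (fuel + 1) m (c :: rest) cur acc =
      PySem.Chars.splitOnMax.go sep fuel (m - 1) (List.drop sep.length (c :: rest)) []
        (cur.reverse :: acc) := by
  conv_lhs => rw [PySem.Chars.splitOnMax.go.eq_def]
  simp [hm, hpre]

theorem pv_splitOnMax_ttl (s2 : List Char) :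
    PySem.Chars.splitOnMax ("--ttl=".toList ++ s2) ['='] 1 = ["--ttl".toList, s2] := by
  have hT : "--ttl=".toList = ['-', '-', 't', 't', 'l', '='] := rfl
  rw [PySem.Chars.splitOnMax, if_neg (by omega)]
  rw [Int.toNat_one]
  have hlen : ("--ttl=".toList ++ s2).length + 1 = (((((s2.length + 2) + 1) + 1) + 1) + 1) + 1 := by
    rw [hT]; simp
  rw [hlen]
  simp only [hT]
  rw [List.cons_append, List.cons_append, List.cons_append, List.cons_append, List.cons_append,
    List.cons_append, List.nil_append]
  rw [pv_som_go_step _ _ _ _ _ _ _ (by omega) (by simp [List.isPrefixOf])]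
  rw [pv_som_go_step _ _ _ _ _ _ _ (by omega) (by simp [List.isPrefixOf])]
  rw [pv_som_go_step _ _ _ _ _ _ _ (by omega) (by simp [List.isPrefixOf])]
  rw [pv_som_go_step _ _ _ _ _ _ _ (by omega) (by simp [List.isPrefixOf])]
  rw [pv_som_go_step _ _ _ _ _ _ _ (by omega) (by simp [List.isPrefixOf])]
  rw [pv_som_go_hit _ _ _ _ _ _ _ (by omega) (by simp [List.isPrefixOf])]
  rw [pv_som_go_zero]
  simp

-- ---- python negative indexing helpers ----
theorem pv_pyGet?_snoc1 {α : Type} (L : List α) (a : α) :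
    PySem.List.pyGet? (L ++ [a]) (-1) = some a := by
  rw [PySem.List.pyGet?, PySem.List.pyIdx?]
  have hp : -((L ++ [a]).length : Int) ≤ -1 := by
    simp only [List.length_append, List.length_cons, List.length_nil]
    omega
  rw [if_neg (by omega), if_pos hp]
  have h1 : (-(-1 : Int)).toNat = 1 := by decide
  rw [h1]
  have h2 : ((some ((L ++ [a]).length - 1)).bind fun k => (L ++ [a])[k]?) =
      (L ++ [a])[(L ++ [a]).length - 1]? := rfl
  rw [h2]
  rw [show (L ++ [a]).length - 1 = L.length by simp]
  simp

theorem pv_pyGet?_snoc2 {α : Type} (L : List α) (a b : α) :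
    PySem.List.pyGet? (L ++ [a, b]) (-2) = some a := by
  rw [PySem.List.pyGet?, PySem.List.pyIdx?]
  have hp : -((L ++ [a, b]).length : Int) ≤ -2 := by
    simp only [List.length_append, List.length_cons, List.length_nil]
    omega
  rw [if_neg (by omega), if_pos hp]
  have h1 : (-(-2 : Int)).toNat = 2 := by decide
  rw [h1]
  have h2 : ((some ((L ++ [a, b]).length - 2)).bind fun k => (L ++ [a, b])[k]?) =
      (L ++ [a, b])[(L ++ [a, b]).length - 2]? := rfl
  rw [h2]
  rw [show (L ++ [a, b]).length - 2 = L.length by simp]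
  rw [List.getElem?_append_right (by omega)]
  simp

-- ---- first whitespace index (the `next(...)` generator) ----
theorem pv_findSpace (b : List Char) : ∀ (off : Int),
    (((PySem.List.enumerate b off).find? (fun p => PySem.Chars.isspace p.2)).map Prod.fst) =
      if b.any PySem.Chars.isspace then
        some (off + ((b.takeWhile (fun c => !PySem.Chars.isspace c)).length : Int))
      else none := by
  induction b with
  | nil => intro off; rw [pv_enumerate_nil]; simp
  | cons c t ih =>
    intro off
    rw [pv_enumerate_cons]
    cases hc : PySem.Chars.isspace c with
    | true =>
      rw [List.find?_cons_of_pos (p := fun p : Int × Char => PySem.Chars.isspace p.2)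
        (a := (off, c)) (l := PySem.List.enumerate t (off + 1)) (by simp [hc])]
      have htkw : (c :: t).takeWhile (fun c => !PySem.Chars.isspace c) = [] :=
        List.takeWhile_cons_of_neg (by simp [hc])
      simp [hc, htkw]
    | false =>
      rw [List.find?_cons_of_neg (p := fun p : Int × Char => PySem.Chars.isspace p.2)
        (a := (off, c)) (l := PySem.List.enumerate t (off + 1)) (by simp [hc])]
      rw [ih (off + 1)]
      have hany : (c :: t).any PySem.Chars.isspace = t.any PySem.Chars.isspace := by simp [hc]
      rw [hany, List.takeWhile_cons_of_pos (by simp [hc])]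
      cases t.any PySem.Chars.isspace with
      | true => simp; ring
      | false => simp

-- ---- strip/rstrip structure ----
theorem pv_lstrip_eq_self {b : List Char} (hb : b ≠ [])
    (h : PySem.Chars.isspace (b.head hb) = false) : b.dropWhile PySem.Chars.isspace = b := by
  cases b with
  | nil => cases hb rfl
  | cons c t =>
    simp only [List.head_cons] at h
    exact List.dropWhile_cons_of_neg (by simp [h])

theorem pv_rstrip_eq_self {b : List Char} (hb : b ≠ [])
    (h : PySem.Chars.isspace (b.getLast hb) = false) : PySem.Chars.rstrip b = b := by
  rw [PySem.Chars.rstrip]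
  rw [pv_lstrip_eq_self (by simpa using hb) (by rw [List.head_reverse]; exact h)]
  exact List.reverse_reverse b

theorem pv_strip_last_nw (y : List Char) (h : PySem.Chars.strip y ≠ []) :
    PySem.Chars.isspace ((PySem.Chars.strip y).getLast h) = false := by
  have h' : (PySem.Chars.lstrip y).reverse.dropWhile PySem.Chars.isspace ≠ [] := by
    intro hnil
    apply h
    rw [PySem.Chars.strip, PySem.Chars.rstrip, hnil]
    rfl
  have h2 := List.head_dropWhile_not PySem.Chars.isspace h'
  show PySem.Chars.isspace
    (((PySem.Chars.lstrip y).reverse.dropWhile PySem.Chars.isspace).reverse.getLast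
      (by simpa using h')) = false
  rw [List.getLast_reverse (by simpa using h')]
  exact h2

theorem pv_strip_head_nw (y : List Char) (h : PySem.Chars.strip y ≠ []) :
    PySem.Chars.isspace ((PySem.Chars.strip y).head h) = false := by
  have h' : (PySem.Chars.lstrip y).reverse.dropWhile PySem.Chars.isspace ≠ [] := by
    intro hnil
    apply h
    rw [PySem.Chars.strip, PySem.Chars.rstrip, hnil]
    rfl
  have hlne : PySem.Chars.lstrip y ≠ [] := by
    intro hnil
    rw [hnil] at h'
    simp at h'
  show PySem.Chars.isspace
    (((PySem.Chars.lstrip y).reverse.dropWhile PySem.Chars.isspace).reverse.head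
      (by simpa using h')) = false
  rw [List.head_reverse (by simpa using h')]
  rw [List.IsSuffix.getLast (List.dropWhile_suffix _) h']
  rw [List.getLast_reverse (by simpa using hlne)]
  exact List.head_dropWhile_not PySem.Chars.isspace hlne

-- ---- the two TTL parsers agree ----
theorem pv_ttl_eq (raw : List Char) : pvParseTtlA raw = pvTtlB raw := by
  rw [pvParseTtlA, pvTtlB]
  by_cases hv : PySem.Chars.strip raw = []
  · simp [hv]
  · simp only [if_neg hv]
    by_cases hs : (PySem.List.pyGet? (PySem.Chars.strip raw) (-1)).getD ' ' = 's'
    · rw [hs]; rfl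
    · by_cases hm : (PySem.List.pyGet? (PySem.Chars.strip raw) (-1)).getD ' ' = 'm'
      · rw [hm]; rfl
      · by_cases hh : (PySem.List.pyGet? (PySem.Chars.strip raw) (-1)).getD ' ' = 'h'
        · rw [hh]; rfl
        · by_cases hd : (PySem.List.pyGet? (PySem.Chars.strip raw) (-1)).getD ' ' = 'd'
          · rw [hd]; rfl
          · rw [if_neg (by simp [hs, hm, hh, hd])]
            have hcont : pvUnits.contains ((PySem.List.pyGet? (PySem.Chars.strip raw) (-1)).getD ' ')
                = false := by
              simp [pvUnits, PySem.Dict.contains_mk]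
              exact ⟨fun h => hs h.symm, fun h => hm h.symm, fun h => hh h.symm,
                fun h => hd h.symm⟩
            rw [PySem.Dict.getD_of_not_contains pvUnits 1 hcont, hcont]
            simp

-- ---- assorted small helpers for the final assembly ----
theorem pv_lastTok_ne (cs : List Char) (hne : cs ≠ [])
    (hlast : PySem.Chars.isspace (cs.getLast hne) = false) : pvLastTok cs ≠ [] := by
  rw [pvLastTok]
  cases hr : cs.reverse with
  | nil => exact absurd (by simpa using hr) hne
  | cons c r =>
    have hc : c = cs.getLast hne := by
      have h1 : cs.reverse.head? = some c := by rw [hr]; rfl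
      rw [List.head?_eq_some_head (by simp [hr])] at h1
      have h2 := List.head_reverse (l := cs) (by simp [hr])
      rw [h2] at h1
      exact (Option.some.inj h1).symm
    rw [List.takeWhile_cons_of_pos (by simp [hc, hlast])]
    simp

theorem pv_strip_all_nw (k : List Char)
    (h : k.all (fun c => !PySem.Chars.isspace c) = true) : PySem.Chars.strip k = k := by
  cases hk : k with
  | nil => rfl
  | cons c t =>
    rw [← hk]
    have hkne : k ≠ [] := by rw [hk]; simp
    have hmemh : PySem.Chars.isspace (k.head hkne) = false := by
      have := List.all_eq_true.mp h _ (List.head_mem hkne)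
      simpa using this
    have hmeml : PySem.Chars.isspace (k.getLast hkne) = false := by
      have := List.all_eq_true.mp h _ (List.getLast_mem hkne)
      simpa using this
    rw [PySem.Chars.strip, PySem.Chars.lstrip, pv_lstrip_eq_self hkne hmemh]
    exact pv_rstrip_eq_self hkne hmeml

theorem pv_rstrip_take (cs : List Char) :
    PySem.Chars.rstrip (cs.take (cs.length - (pvLastTok cs).length)) = pvHead cs := by
  have hlen : (pvLastTok cs).length = (cs.reverse.takeWhile (fun c => !PySem.Chars.isspace c)).length := by
    rw [pvLastTok]; simp
  have htake : cs.take (cs.length - (pvLastTok cs).length) =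
      (cs.reverse.drop (pvLastTok cs).length).reverse := by
    rw [List.reverse_drop]
    simp [hlen]
  rw [htake, hlen, pv_drop_length_takeWhile]
  rw [PySem.Chars.rstrip, List.reverse_reverse]
  rw [pvHead]

theorem pv_take_prefix_eq {p cs : List Char} (h : p <+: cs) (k : Nat) (hk : k ≤ p.length) :
    cs.take k = p.take k := by
  obtain ⟨sfx, rfl⟩ := h
  rw [List.take_append_of_le_length hk]

theorem pv_spans_snoc (cs : List Char) (hne : cs ≠ [])
    (hlast : PySem.Chars.isspace (cs.getLast hne) = false) :
    pvTokenSpans cs = ssA 0 (pvHead cs) ++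
      [(((cs.length - (pvLastTok cs).length : Nat) : Int), pvLastTok cs)] := by
  rw [pv_tokenSpans_eq_ssA, ssA_ml cs.length cs le_rfl 0 hne hlast]
  simp

theorem pv_slice_neg_one (v : List Char) : PySem.List.slice v none (some (-1)) = v.dropLast := by
  simp only [PySem.List.slice, PySem.List.clampIdx]
  split_ifs with h1 h2
  · have hv : v = [] := by
      have : v.length = 0 := by omega
      exact List.eq_nil_of_length_eq_zero this
    subst hv
    rfl
  · have h3 : ((v.length : Int) + -1).toNat = v.length - 1 := by omega
    rw [h3, List.dropLast_eq_take]
    simp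
  · omega

theorem pv_pyGet?_last (v : List Char) (hne : v ≠ []) :
    PySem.List.pyGet? v (-1) = some (v.getLast hne) := by
  conv_lhs => rw [← List.dropLast_append_getLast hne]
  exact pv_pyGet?_snoc1 _ _

theorem pv_getLastD_eq (v : List Char) (hne : v ≠ []) : v.getLastD ' ' = v.getLast hne := by
  rw [List.getLastD_eq_getLast?, List.getLast?_eq_some_getLast hne]
  rfl

-- if Pre_'s TTL condition holds, A's parser returns a (positive) value
theorem pv_okttl_some (s : List Char) (h : pvOkTTL s = true) :
    ∃ n : Int, pvParseTtlA s = some n := by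
  rw [pvOkTTL] at h
  simp only [Bool.and_eq_true, decide_eq_true_eq] at h
  obtain ⟨hv, hmatch⟩ := h
  rw [pvParseTtlA]
  rw [if_neg hv]
  have hsfx : (PySem.List.pyGet? (PySem.Chars.strip s) (-1)).getD ' ' =
      (PySem.Chars.strip s).getLastD ' ' := by
    rw [pv_pyGet?_last _ hv, pv_getLastD_eq _ hv]
    rfl
  cases hof : PySem.Int.ofChars? (if (PySem.Chars.strip s).getLastD ' ' ∈
      (['s', 'm', 'h', 'd'] : List Char) then (PySem.Chars.strip s).dropLast
      else PySem.Chars.strip s) with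
  | none => rw [hof] at hmatch; cases hmatch
  | some n =>
    rw [hof] at hmatch
    have hpos : 0 < n := by simpa using hmatch
    by_cases hmem : (PySem.Chars.strip s).getLastD ' ' ∈ (['s', 'm', 'h', 'd'] : List Char)
    · rw [if_pos hmem] at hof
      simp only [hsfx, if_pos hmem, pv_slice_neg_one, hof]
      rw [if_neg (by omega)]
      exact ⟨_, rfl⟩
    · rw [if_neg hmem] at hof
      simp only [hsfx, if_neg hmem, hof]
      rw [if_neg (by omega)]
      exact ⟨_, rfl⟩

-- rsplit(None, 2) in terms of the decomposition helpers
theorem pv_rsplit_char (cs : List Char) (hne : cs ≠ [])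
    (hlast : PySem.Chars.isspace (cs.getLast hne) = false) :
    pvRsplit0Max cs 2 =
      if pvHead cs = [] then [pvLastTok cs]
      else if pvHead (pvHead cs) = [] then [pvLastTok (pvHead cs), pvLastTok cs]
      else [pvHead (pvHead cs), pvLastTok (pvHead cs), pvLastTok cs] := by
  have hrne : cs.reverse ≠ [] := by simpa using hne
  have hrhead : PySem.Chars.isspace (cs.reverse.head hrne) = false := by
    rw [List.head_reverse]; exact hlast
  have hr : cs.reverse.dropWhile PySem.Chars.isspace = cs.reverse :=
    pv_lstrip_eq_self hrne hrhead
  rw [pvRsplit0Max, show (2 : Int) = ((2 : Nat) : Int) by rfl, pv_split0Max_eq_spB]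
  rw [spB_succ 2 (by omega) (by rw [hr]; exact hrne), hr]
  have htw : cs.reverse.takeWhile (fun c => !PySem.Chars.isspace c) = (pvLastTok cs).reverse := by
    rw [pvLastTok, List.reverse_reverse]
  have hpv : (cs.reverse.dropWhile (fun c => !PySem.Chars.isspace c)).dropWhile
      PySem.Chars.isspace = (pvHead cs).reverse := by
    rw [pvHead, List.reverse_reverse]
  by_cases hp : pvHead cs = []
  · rw [if_pos hp]
    rw [spB_of_nil 1 (by rw [hpv, hp]; rfl), htw]
    simp
  · rw [if_neg hp]
    rw [spB_succ 1 (by omega) (by rw [hpv]; simpa using hp), hpv]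
    have htw2 : (pvHead cs).reverse.takeWhile (fun c => !PySem.Chars.isspace c) =
        (pvLastTok (pvHead cs)).reverse := by
      rw [pvLastTok, List.reverse_reverse]
    have hpv2 : ((pvHead cs).reverse.dropWhile (fun c => !PySem.Chars.isspace c)).dropWhile
        PySem.Chars.isspace = (pvHead (pvHead cs)).reverse := by
      simp only [pvHead, List.reverse_reverse]
    rw [htw2]
    by_cases hp2 : pvHead (pvHead cs) = []
    · rw [if_pos hp2]
      rw [spB_of_nil 0 (by rw [hpv2, hp2]; rfl), htw]
      simp
    · rw [if_neg hp2]
      rw [spB_zero (by rw [hpv2]; simpa using hp2), hpv2, htw]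
      simp

-- the common final key/value stage of both programs
theorem pv_Q_ne (b : List Char) (hbne : b ≠ [])
    (hbl : PySem.Chars.isspace (b.getLast hbne) = false)
    (hany : b.any PySem.Chars.isspace = true) :
    (b.dropWhile (fun c => !PySem.Chars.isspace c)).dropWhile PySem.Chars.isspace ≠ [] := by
  have hdne : b.dropWhile (fun c => !PySem.Chars.isspace c) ≠ [] := by
    intro hnil
    have hall := List.dropWhile_eq_nil_iff.mp hnil
    obtain ⟨w, hw, hws⟩ := List.any_eq_true.mp hany
    have := hall w hw
    simp [hws] at this
  intro hnil
  have hall := List.dropWhile_eq_nil_iff.mp hnil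
  have hlasteq : (b.dropWhile (fun c => !PySem.Chars.isspace c)).getLast hdne = b.getLast hbne :=
    List.IsSuffix.getLast (List.dropWhile_suffix _) hdne
  have := hall _ (hlasteq ▸ List.getLast_mem hdne)
  simp [hbl] at this

theorem pv_strip_Q (b : List Char) (hbne : b ≠ [])
    (hbl : PySem.Chars.isspace (b.getLast hbne) = false)
    (hany : b.any PySem.Chars.isspace = true) :
    PySem.Chars.strip ((b.dropWhile (fun c => !PySem.Chars.isspace c))) =
      (b.dropWhile (fun c => !PySem.Chars.isspace c)).dropWhile PySem.Chars.isspace := by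
  have hQne := pv_Q_ne b hbne hbl hany
  rw [PySem.Chars.strip, PySem.Chars.lstrip]
  apply pv_rstrip_eq_self hQne
  have hdne : b.dropWhile (fun c => !PySem.Chars.isspace c) ≠ [] := by
    intro hnil; rw [hnil] at hQne; simp at hQne
  have h1 : ((b.dropWhile (fun c => !PySem.Chars.isspace c)).dropWhile
      PySem.Chars.isspace).getLast hQne = b.getLast hbne := by
    rw [List.IsSuffix.getLast (List.dropWhile_suffix _) hQne]
    exact List.IsSuffix.getLast (List.dropWhile_suffix _) hdne
  rw [h1]
  exact hbl

theorem pv_tailA_eq (b : List Char) (ttl : Option Int) (hbne : b ≠ [])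
    (hbh : PySem.Chars.isspace (b.head hbne) = false)
    (hbl : PySem.Chars.isspace (b.getLast hbne) = false)
    (hany : b.any PySem.Chars.isspace = true) :
    (match ((PySem.List.enumerate b 0).find? (fun p => PySem.Chars.isspace p.2)).map Prod.fst with
      | none => none
      | some i =>
        if PySem.Chars.strip (PySem.List.slice b none (some i)) = [] ∨
            PySem.Chars.strip (PySem.List.slice b (some i) none) = [] then none
        else some (PySem.Chars.strip (PySem.List.slice b none (some i)),
          PySem.Chars.strip (PySem.List.slice b (some i) none), ttl)) =
      some (b.takeWhile (fun c => !PySem.Chars.isspace c),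
        (b.dropWhile (fun c => !PySem.Chars.isspace c)).dropWhile PySem.Chars.isspace, ttl) := by
  rw [pv_findSpace b 0, if_pos hany, zero_add]
  have hkey : PySem.Chars.strip (PySem.List.slice b none
      (some ((b.takeWhile (fun c => !PySem.Chars.isspace c)).length : Int))) =
      b.takeWhile (fun c => !PySem.Chars.isspace c) := by
    rw [PySem.List.slice_to _ (by positivity), Int.toNat_natCast, pv_take_length_takeWhile]
    exact pv_strip_all_nw _ List.all_takeWhile
  have hval : PySem.Chars.strip (PySem.List.slice b
      (some ((b.takeWhile (fun c => !PySem.Chars.isspace c)).length : Int)) none) =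
      (b.dropWhile (fun c => !PySem.Chars.isspace c)).dropWhile PySem.Chars.isspace := by
    rw [PySem.List.slice_from _ (by positivity), Int.toNat_natCast, pv_drop_length_takeWhile]
    exact pv_strip_Q b hbne hbl hany
  have hkne : b.takeWhile (fun c => !PySem.Chars.isspace c) ≠ [] := by
    cases hb : b with
    | nil => exact absurd hb hbne
    | cons c t =>
      have hch : PySem.Chars.isspace c = false := by
        have := hbh
        simp only [hb, List.head_cons] at this
        exact this
      rw [List.takeWhile_cons_of_pos (by simp [hch])]
      simp
  have hQne := pv_Q_ne b hbne hbl hany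
  simp only [hkey, hval]
  rw [if_neg (by simp [hkne, hQne])]

theorem pv_split01_eq (b : List Char) (hbne : b ≠ [])
    (hbh : PySem.Chars.isspace (b.head hbne) = false)
    (hbl : PySem.Chars.isspace (b.getLast hbne) = false)
    (hany : b.any PySem.Chars.isspace = true) :
    PySem.Chars.split₀Max b 1 = [b.takeWhile (fun c => !PySem.Chars.isspace c),
      (b.dropWhile (fun c => !PySem.Chars.isspace c)).dropWhile PySem.Chars.isspace] := by
  have hb : b.dropWhile PySem.Chars.isspace = b := pv_lstrip_eq_self hbne hbh
  rw [show (1 : Int) = ((1 : Nat) : Int) by rfl, pv_split0Max_eq_spB]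
  rw [spB_succ 1 (by omega) (by rw [hb]; exact hbne), hb]
  rw [spB_zero (pv_Q_ne b hbne hbl hany)]

theorem pv_tailB_eq (b : List Char) (ttl : Option Int) (hbne : b ≠ [])
    (hbh : PySem.Chars.isspace (b.head hbne) = false)
    (hbl : PySem.Chars.isspace (b.getLast hbne) = false)
    (hany : b.any PySem.Chars.isspace = true) :
    (if ttl.isSome ∧ b = [] then none
     else if (PySem.Chars.split₀Max b 1).length < 2 then none
     else some ((PySem.List.pyGet? (PySem.Chars.split₀Max b 1) 0).getD [],
       (PySem.List.pyGet? (PySem.Chars.split₀Max b 1) 1).getD [], ttl)) =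
      some (b.takeWhile (fun c => !PySem.Chars.isspace c),
        (b.dropWhile (fun c => !PySem.Chars.isspace c)).dropWhile PySem.Chars.isspace, ttl) := by
  rw [if_neg (by simp [hbne]), pv_split01_eq b hbne hbh hbl hany]
  rw [if_neg (by simp)]
  simp [PySem.List.pyGet?, PySem.List.pyIdx?]

theorem pv_prefix_head {p cs : List Char} (h : p <+: cs) (hp : p ≠ []) (hcs : cs ≠ []) :
    p.head hp = cs.head hcs := by
  obtain ⟨sfx, rfl⟩ := h
  exact (List.head_append_of_ne_nil hp).symm

-- the central case analysis: both cores agree on every input admitted by Pre_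
theorem pv_core_eq (y : List Char) (hne : PySem.Chars.strip y ≠ [])
    (hcase : if PySem.Chars.startswith (pvLastTok (PySem.Chars.strip y)) "--ttl=".toList then
        pvOkTTL ((pvLastTok (PySem.Chars.strip y)).drop 6) = true ∧
          pvHead (PySem.Chars.strip y) ≠ [] ∧
          (pvHead (PySem.Chars.strip y)).any PySem.Chars.isspace = true
      else if pvHead (PySem.Chars.strip y) ≠ [] ∧
          pvLastTok (pvHead (PySem.Chars.strip y)) = "--ttl".toList then
        pvOkTTL (pvLastTok (PySem.Chars.strip y)) = true ∧
          pvHead (pvHead (PySem.Chars.strip y)) ≠ [] ∧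
          (pvHead (pvHead (PySem.Chars.strip y))).any PySem.Chars.isspace = true
      else ((PySem.Chars.strip y).any PySem.Chars.isspace) = true) :
    pvCoreA y = pvCoreB y := by
  have hlast := pv_strip_last_nw y hne
  have hhead := pv_strip_head_nw y hne
  have htne := pv_lastTok_ne _ hne hlast
  have htle := pv_lastTok_len_le (PySem.Chars.strip y)
  have hspans := pv_spans_snoc _ hne hlast
  have hget1 : PySem.List.pyGet? (pvTokenSpans (PySem.Chars.strip y)) (-1) =
      some ((((PySem.Chars.strip y).length - (pvLastTok (PySem.Chars.strip y)).length : Nat) : Int),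
        pvLastTok (PySem.Chars.strip y)) := by
    rw [hspans]; exact pv_pyGet?_snoc1 _ _
  have hbodyA : PySem.Chars.rstrip (PySem.List.slice (PySem.Chars.strip y) none
      (some ((((PySem.Chars.strip y).length - (pvLastTok (PySem.Chars.strip y)).length : Nat) : Int))))
      = pvHead (PySem.Chars.strip y) := by
    rw [PySem.List.slice_to _ (by positivity), Int.toNat_natCast]
    exact pv_rstrip_take _
  simp only [pvCoreA, pvCoreB]
  rw [if_neg hne, if_neg hne]
  by_cases hstart : PySem.Chars.startswith (pvLastTok (PySem.Chars.strip y)) "--ttl=".toList = true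
  · -- Case A: trailing --ttl=<duration>
    rw [if_pos hstart] at hcase
    obtain ⟨hok, hpne, hpany⟩ := hcase
    have hplast := pv_head_last_not_ws _ hpne
    have hphead : PySem.Chars.isspace ((pvHead (PySem.Chars.strip y)).head hpne) = false := by
      rw [pv_prefix_head (pv_head_prefix _) hpne hne]
      exact hhead
    -- the token is "--ttl=" ++ s2
    obtain ⟨s2, hs2⟩ : ∃ s2, "--ttl=".toList ++ s2 = pvLastTok (PySem.Chars.strip y) := by
      rw [PySem.Chars.startswith] at hstart
      exact List.isPrefixOf_iff_prefix.mp hstart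
    have hdrop6 : (pvLastTok (PySem.Chars.strip y)).drop 6 = s2 := by
      rw [← hs2, show (6 : Nat) = "--ttl=".toList.length from rfl, List.drop_left]
    obtain ⟨n, hn⟩ := pv_okttl_some s2 (by rw [← hdrop6]; exact hok)
    -- A's strip_trailing_ttl
    have hsplit : (PySem.Chars.splitMax? (pvLastTok (PySem.Chars.strip y)) ['='] 1).getD [] =
        ["--ttl".toList, s2] := by
      rw [PySem.Chars.splitMax?, if_neg (by simp), Option.getD_some, ← hs2, pv_splitOnMax_ttl]
    have hargA : (PySem.List.pyGet? ((PySem.Chars.splitMax? (pvLastTok (PySem.Chars.strip y))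
        ['='] 1).getD []) 1).getD [] = s2 := by
      rw [hsplit]; rfl
    have hstripA : pvStripTtlA (PySem.Chars.strip y) = some (pvHead (PySem.Chars.strip y), some n) := by
      simp only [pvStripTtlA, hget1, Option.getD_some]
      rw [if_pos ⟨by rw [hspans]; simp, hstart⟩]
      rw [hargA, hn]
      show (if PySem.Chars.rstrip (PySem.List.slice (PySem.Chars.strip y) none
          (some ((((PySem.Chars.strip y).length - (pvLastTok (PySem.Chars.strip y)).length : Nat))
            : Int))) = [] then none
        else some (PySem.Chars.rstrip (PySem.List.slice (PySem.Chars.strip y) none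
          (some ((((PySem.Chars.strip y).length - (pvLastTok (PySem.Chars.strip y)).length : Nat))
            : Int))), some n)) = _
      rw [hbodyA, if_neg hpne]
    rw [hstripA]
    -- B side
    have hparts : pvRsplit0Max (PySem.Chars.strip y) 2 =
        if pvHead (pvHead (PySem.Chars.strip y)) = [] then
          [pvLastTok (pvHead (PySem.Chars.strip y)), pvLastTok (PySem.Chars.strip y)]
        else [pvHead (pvHead (PySem.Chars.strip y)), pvLastTok (pvHead (PySem.Chars.strip y)),
          pvLastTok (PySem.Chars.strip y)] := by
      rw [pv_rsplit_char _ hne hlast, if_neg hpne]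
    have hlastP : (PySem.List.pyGet? (pvRsplit0Max (PySem.Chars.strip y) 2) (-1)).getD [] =
        pvLastTok (PySem.Chars.strip y) := by
      rw [hparts]
      by_cases hp2 : pvHead (pvHead (PySem.Chars.strip y)) = []
      · rw [if_pos hp2, show [pvLastTok (pvHead (PySem.Chars.strip y)),
          pvLastTok (PySem.Chars.strip y)] = [pvLastTok (pvHead (PySem.Chars.strip y))] ++
          [pvLastTok (PySem.Chars.strip y)] from rfl, pv_pyGet?_snoc1]
        rfl
      · rw [if_neg hp2, show [pvHead (pvHead (PySem.Chars.strip y)),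
          pvLastTok (pvHead (PySem.Chars.strip y)), pvLastTok (PySem.Chars.strip y)] =
          [pvHead (pvHead (PySem.Chars.strip y)), pvLastTok (pvHead (PySem.Chars.strip y))] ++
          [pvLastTok (PySem.Chars.strip y)] from rfl, pv_pyGet?_snoc1]
        rfl
    have httlB : pvTtlB (PySem.List.slice (pvLastTok (PySem.Chars.strip y)) (some 6) none) =
        some n := by
      rw [PySem.List.slice_from _ (by omega), show ((6 : Int)).toNat = 6 from rfl, hdrop6,
        ← pv_ttl_eq, hn]
    have hbodyB : (PySem.Chars.strip y).length - (pvLastTok (PySem.Chars.strip y)).length =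
        (((PySem.Chars.strip y).length : Int) - ((pvLastTok (PySem.Chars.strip y)).length : Int)).toNat
        := by omega
    simp only [hlastP]
    rw [if_pos hstart]
    rw [httlB]
    have hsliceB : ((PySem.Chars.strip y).length : Int) -
        ((pvLastTok (PySem.Chars.strip y)).length : Int) =
        ((((PySem.Chars.strip y).length - (pvLastTok (PySem.Chars.strip y)).length : Nat)) : Int) := by
      omega
    rw [hsliceB, hbodyA]
    -- both sides now run the key/value stage on pvHead (strip y) with ttl = some n
    rw [pv_tailA_eq _ (some n) hpne hphead hplast hpany]
    show _ = (if (some n : Option Int).isSome ∧ pvHead (PySem.Chars.strip y) = [] then none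
      else if (PySem.Chars.split₀Max (pvHead (PySem.Chars.strip y)) 1).length < 2 then none
      else some ((PySem.List.pyGet? (PySem.Chars.split₀Max (pvHead (PySem.Chars.strip y)) 1) 0).getD [],
        (PySem.List.pyGet? (PySem.Chars.split₀Max (pvHead (PySem.Chars.strip y)) 1) 1).getD [],
        some n))
    rw [pv_tailB_eq _ (some n) hpne hphead hplast hpany]
  · -- not Case A
    have hstart' : PySem.Chars.startswith (pvLastTok (PySem.Chars.strip y)) "--ttl=".toList
        = false := by simpa using hstart
    rw [if_neg hstart] at hcase
    by_cases hcond : pvHead (PySem.Chars.strip y) ≠ [] ∧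
        pvLastTok (pvHead (PySem.Chars.strip y)) = "--ttl".toList
    · -- Case B: trailing "--ttl <duration>"
      rw [if_pos hcond] at hcase
      obtain ⟨hok, hp2ne, hp2any⟩ := hcase
      obtain ⟨hpne, ht2⟩ := hcond
      have hplast := pv_head_last_not_ws _ hpne
      have hp2last := pv_head_last_not_ws _ hp2ne
      have hp2head : PySem.Chars.isspace ((pvHead (pvHead (PySem.Chars.strip y))).head hp2ne)
          = false := by
        rw [pv_prefix_head (pv_head_prefix _) hp2ne hpne,
          pv_prefix_head (pv_head_prefix _) hpne hne]
        exact hhead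
      have ht2le := pv_lastTok_len_le (pvHead (PySem.Chars.strip y))
      have hp_spans : ssA 0 (pvHead (PySem.Chars.strip y)) =
          ssA 0 (pvHead (pvHead (PySem.Chars.strip y))) ++
            [((((pvHead (PySem.Chars.strip y)).length -
              (pvLastTok (pvHead (PySem.Chars.strip y))).length : Nat) : Int),
              pvLastTok (pvHead (PySem.Chars.strip y)))] := by
        have h10 := ssA_ml (pvHead (PySem.Chars.strip y)).length _ le_rfl 0 hpne hplast
        simpa using h10
      have hget2 : PySem.List.pyGet? (pvTokenSpans (PySem.Chars.strip y)) (-2) =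
          some ((((pvHead (PySem.Chars.strip y)).length -
            (pvLastTok (pvHead (PySem.Chars.strip y))).length : Nat) : Int),
            pvLastTok (pvHead (PySem.Chars.strip y))) := by
        rw [hspans, hp_spans, List.append_assoc]
        exact pv_pyGet?_snoc2 _ _ _
      have hlen2 : (pvTokenSpans (PySem.Chars.strip y)).length ≥ 2 := by
        rw [hspans, hp_spans]
        simp
      obtain ⟨n, hn⟩ := pv_okttl_some _ hok
      have hbody2 : PySem.Chars.rstrip (PySem.List.slice (PySem.Chars.strip y) none
          (some ((((pvHead (PySem.Chars.strip y)).length -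
            (pvLastTok (pvHead (PySem.Chars.strip y))).length : Nat) : Int)))) =
          pvHead (pvHead (PySem.Chars.strip y)) := by
        rw [PySem.List.slice_to _ (by positivity), Int.toNat_natCast]
        rw [pv_take_prefix_eq (pv_head_prefix (PySem.Chars.strip y)) _ (by omega)]
        exact pv_rstrip_take _
      have hstripA : pvStripTtlA (PySem.Chars.strip y) =
          some (pvHead (pvHead (PySem.Chars.strip y)), some n) := by
        simp only [pvStripTtlA, hget1, hget2, Option.getD_some]
        rw [if_neg (by intro hced; rw [hstart'] at hced; simp at hced)]
        rw [if_pos ⟨hlen2, ht2⟩]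
        rw [hn]
        show (if PySem.Chars.rstrip (PySem.List.slice (PySem.Chars.strip y) none
            (some ((((pvHead (PySem.Chars.strip y)).length -
              (pvLastTok (pvHead (PySem.Chars.strip y))).length : Nat) : Int)))) = [] then none
          else some (PySem.Chars.rstrip (PySem.List.slice (PySem.Chars.strip y) none
            (some ((((pvHead (PySem.Chars.strip y)).length -
              (pvLastTok (pvHead (PySem.Chars.strip y))).length : Nat) : Int)))), some n)) = _
        rw [hbody2, if_neg hp2ne]
      rw [hstripA]
      -- B side
      have hparts : pvRsplit0Max (PySem.Chars.strip y) 2 =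
          [pvHead (pvHead (PySem.Chars.strip y)), pvLastTok (pvHead (PySem.Chars.strip y)),
            pvLastTok (PySem.Chars.strip y)] := by
        rw [pv_rsplit_char _ hne hlast, if_neg hpne, if_neg hp2ne]
      have hlastP : (PySem.List.pyGet? (pvRsplit0Max (PySem.Chars.strip y) 2) (-1)).getD [] =
          pvLastTok (PySem.Chars.strip y) := by
        rw [hparts, show [pvHead (pvHead (PySem.Chars.strip y)),
          pvLastTok (pvHead (PySem.Chars.strip y)), pvLastTok (PySem.Chars.strip y)] =
          [pvHead (pvHead (PySem.Chars.strip y)), pvLastTok (pvHead (PySem.Chars.strip y))] ++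
          [pvLastTok (PySem.Chars.strip y)] from rfl, pv_pyGet?_snoc1]
        rfl
      have hget2B : (PySem.List.pyGet? (pvRsplit0Max (PySem.Chars.strip y) 2) (-2)).getD [] =
          pvLastTok (pvHead (PySem.Chars.strip y)) := by
        rw [hparts, show [pvHead (pvHead (PySem.Chars.strip y)),
          pvLastTok (pvHead (PySem.Chars.strip y)), pvLastTok (PySem.Chars.strip y)] =
          [pvHead (pvHead (PySem.Chars.strip y))] ++ [pvLastTok (pvHead (PySem.Chars.strip y)),
          pvLastTok (PySem.Chars.strip y)] from rfl, pv_pyGet?_snoc2]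
        rfl
      simp only [hlastP]
      rw [if_neg (by rw [hstart']; simp)]
      rw [if_pos ⟨by rw [hparts]; simp, by rw [hget2B]; exact ht2⟩]
      rw [← pv_ttl_eq, hn]
      have hlen3 : (pvRsplit0Max (PySem.Chars.strip y) 2).length = 3 := by rw [hparts]; rfl
      have hget0 : (PySem.List.pyGet? (pvRsplit0Max (PySem.Chars.strip y) 2) 0).getD [] =
          pvHead (pvHead (PySem.Chars.strip y)) := by rw [hparts]; rfl
      rw [pv_tailA_eq _ (some n) hp2ne hp2head hp2last hp2any]
      show _ = (match some ((if (pvRsplit0Max (PySem.Chars.strip y) 2).length = 3 then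
          (PySem.List.pyGet? (pvRsplit0Max (PySem.Chars.strip y) 2) 0).getD [] else []),
          (some n : Option Int)) with
        | none => none
        | some (body, ttl) =>
          if ttl.isSome ∧ body = [] then none
          else if (PySem.Chars.split₀Max body 1).length < 2 then none
          else some ((PySem.List.pyGet? (PySem.Chars.split₀Max body 1) 0).getD [],
            (PySem.List.pyGet? (PySem.Chars.split₀Max body 1) 1).getD [], ttl))
      rw [if_pos hlen3, hget0]
      show _ = (if (some n : Option Int).isSome ∧ pvHead (pvHead (PySem.Chars.strip y)) = [] then
          none
        else if (PySem.Chars.split₀Max (pvHead (pvHead (PySem.Chars.strip y))) 1).length < 2 then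
          none
        else some ((PySem.List.pyGet? (PySem.Chars.split₀Max
            (pvHead (pvHead (PySem.Chars.strip y))) 1) 0).getD [],
          (PySem.List.pyGet? (PySem.Chars.split₀Max
            (pvHead (pvHead (PySem.Chars.strip y))) 1) 1).getD [], some n))
      rw [pv_tailB_eq _ (some n) hp2ne hp2head hp2last hp2any]
    · -- no trailing TTL at all: body is the whole stripped string
      rw [if_neg hcond] at hcase
      have hcondA : ¬((pvTokenSpans (PySem.Chars.strip y)).length ≥ 2 ∧
          ((PySem.List.pyGet? (pvTokenSpans (PySem.Chars.strip y)) (-2)).getD (0, [])).2 =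
            "--ttl".toList) := by
        by_cases hp : pvHead (PySem.Chars.strip y) = []
        · intro ⟨h2, _⟩
          rw [hspans, hp, ssA_nil] at h2
          simp at h2
        · have hplast := pv_head_last_not_ws _ hp
          have hp_spans : ssA 0 (pvHead (PySem.Chars.strip y)) =
              ssA 0 (pvHead (pvHead (PySem.Chars.strip y))) ++
                [((((pvHead (PySem.Chars.strip y)).length -
                  (pvLastTok (pvHead (PySem.Chars.strip y))).length : Nat) : Int),
                  pvLastTok (pvHead (PySem.Chars.strip y)))] := by
            have h10 := ssA_ml (pvHead (PySem.Chars.strip y)).length _ le_rfl 0 hp hplast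
            simpa using h10
          have hget2 : PySem.List.pyGet? (pvTokenSpans (PySem.Chars.strip y)) (-2) =
              some ((((pvHead (PySem.Chars.strip y)).length -
                (pvLastTok (pvHead (PySem.Chars.strip y))).length : Nat) : Int),
                pvLastTok (pvHead (PySem.Chars.strip y))) := by
            rw [hspans, hp_spans, List.append_assoc]
            exact pv_pyGet?_snoc2 _ _ _
          intro ⟨_, hbad⟩
          rw [hget2] at hbad
          exact hcond ⟨hp, by simpa using hbad⟩
      have hstripA : pvStripTtlA (PySem.Chars.strip y) = some (PySem.Chars.strip y, none) := by
        simp only [pvStripTtlA, hget1, Option.getD_some]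
        rw [if_neg (by intro hced; rw [hstart'] at hced; simp at hced)]
        rw [if_neg hcondA]
      rw [hstripA]
      -- B side
      have hlastP : (PySem.List.pyGet? (pvRsplit0Max (PySem.Chars.strip y) 2) (-1)).getD [] =
          pvLastTok (PySem.Chars.strip y) := by
        rw [pv_rsplit_char _ hne hlast]
        by_cases hp : pvHead (PySem.Chars.strip y) = []
        · rw [if_pos hp, show [pvLastTok (PySem.Chars.strip y)] =
            [] ++ [pvLastTok (PySem.Chars.strip y)] from rfl, pv_pyGet?_snoc1]
          rfl
        · rw [if_neg hp]
          by_cases hp2 : pvHead (pvHead (PySem.Chars.strip y)) = []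
          · rw [if_pos hp2, show [pvLastTok (pvHead (PySem.Chars.strip y)),
              pvLastTok (PySem.Chars.strip y)] = [pvLastTok (pvHead (PySem.Chars.strip y))] ++
              [pvLastTok (PySem.Chars.strip y)] from rfl, pv_pyGet?_snoc1]
            rfl
          · rw [if_neg hp2, show [pvHead (pvHead (PySem.Chars.strip y)),
              pvLastTok (pvHead (PySem.Chars.strip y)), pvLastTok (PySem.Chars.strip y)] =
              [pvHead (pvHead (PySem.Chars.strip y)), pvLastTok (pvHead (PySem.Chars.strip y))] ++
              [pvLastTok (PySem.Chars.strip y)] from rfl, pv_pyGet?_snoc1]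
            rfl
      have hcondB : ¬((pvRsplit0Max (PySem.Chars.strip y) 2).length ≥ 2 ∧
          (PySem.List.pyGet? (pvRsplit0Max (PySem.Chars.strip y) 2) (-2)).getD [] =
            "--ttl".toList) := by
        rw [pv_rsplit_char _ hne hlast]
        by_cases hp : pvHead (PySem.Chars.strip y) = []
        · rw [if_pos hp]
          intro ⟨h2, _⟩
          simp at h2
        · rw [if_neg hp]
          by_cases hp2 : pvHead (pvHead (PySem.Chars.strip y)) = []
          · rw [if_pos hp2]
            intro ⟨_, hbad⟩
            rw [show [pvLastTok (pvHead (PySem.Chars.strip y)), pvLastTok (PySem.Chars.strip y)] =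
              [] ++ [pvLastTok (pvHead (PySem.Chars.strip y)), pvLastTok (PySem.Chars.strip y)]
              from rfl, pv_pyGet?_snoc2] at hbad
            exact hcond ⟨hp, by simpa using hbad⟩
          · rw [if_neg hp2]
            intro ⟨_, hbad⟩
            rw [show [pvHead (pvHead (PySem.Chars.strip y)),
              pvLastTok (pvHead (PySem.Chars.strip y)), pvLastTok (PySem.Chars.strip y)] =
              [pvHead (pvHead (PySem.Chars.strip y))] ++ [pvLastTok (pvHead (PySem.Chars.strip y)),
              pvLastTok (PySem.Chars.strip y)] from rfl, pv_pyGet?_snoc2] at hbad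
            exact hcond ⟨hp, by simpa using hbad⟩
      simp only [hlastP]
      rw [if_neg (by rw [hstart']; simp)]
      rw [if_neg hcondB]
      rw [pv_tailA_eq _ none hne hhead hlast hcase]
      show _ = (if (none : Option Int).isSome ∧ PySem.Chars.strip y = [] then none
        else if (PySem.Chars.split₀Max (PySem.Chars.strip y) 1).length < 2 then none
        else some ((PySem.List.pyGet? (PySem.Chars.split₀Max (PySem.Chars.strip y) 1) 0).getD [],
          (PySem.List.pyGet? (PySem.Chars.split₀Max (PySem.Chars.strip y) 1) 1).getD [], none))
      rw [pv_tailB_eq _ none hne hhead hlast hcase]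

-- ===== VERDICT (by name: the statement is the Claim_ definition above) =====
theorem parse_set_args_spec : Claim_equal_parse_set_args := by
  unfold Claim_equal_parse_set_args
  intro rest hdom hpre
  unfold Spec_parse_set_args
  unfold Pre_parse_set_args at hpre
  obtain ⟨hne, hcase⟩ := hpre
  rw [parse_set_args, parse_set_args_alt, pv_core_eq rest.toList hne hcase]
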